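-- pv_equiv track=rewrite | github.com/hkassaei/agentic-network-ops | agentic_chaos/recorder.py | _infer_protocol_impact
-- ===== SOURCE A (Python) =====
-- def _infer_protocol_impact(scenario: dict) -> str:
--     """Infer the primary protocol impact from the scenario's targets."""
--     targets = set()
--     for f in scenario.get("faults", []):
--         targets.add(f.get("target", ""))
--
--     if targets & {"rtpengine"}:
--         return "RTP"
--     if targets & {"pcscf", "icscf", "scscf"}:
--         return "SIP"
--     if targets & {"pyhss"}:
--         return "Diameter"
--     if targets & {"upf", "nr_gnb"}:
--         return "GTP-U"
--     if targets & {"amf"}: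
--         return "NGAP"
--     if targets & {"smf"}:
--         return "PFCP"
--     return "multiple"
-- ===== SOURCE B (Python) =====
-- _RANK = {
--     "rtpengine": 0,
--     "pcscf": 1,
--     "icscf": 1,
--     "scscf": 1,
--     "pyhss": 2,
--     "upf": 3,
--     "nr_gnb": 3,
--     "amf": 4,
--     "smf": 5,
-- }
--
-- _NAMES = ["RTP", "SIP", "Diameter", "GTP-U", "NGAP", "PFCP", "multiple"]
--
--
-- def _infer_protocol_impact(scenario: dict) -> str:
--     """Infer the primary protocol impact from the scenario's targets."""
--     best = 6
--     for f in scenario.get("faults", []):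
--         best = min(best, _RANK.get(f.get("target", ""), 6))
--     return _NAMES[best]
-- ===== Notes on version B (the rewrite author's own statement) =====
-- stated objective: alternative
-- what changed: Replaces A's set collection plus six ordered set-intersection branches by a single min-reduction: each fault target maps to a numeric severity rank, the loop keeps the minimum rank, and the answer is read off a name table indexed by that minimum (no set, no membership scan, no branch chain).
import Mathlib
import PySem

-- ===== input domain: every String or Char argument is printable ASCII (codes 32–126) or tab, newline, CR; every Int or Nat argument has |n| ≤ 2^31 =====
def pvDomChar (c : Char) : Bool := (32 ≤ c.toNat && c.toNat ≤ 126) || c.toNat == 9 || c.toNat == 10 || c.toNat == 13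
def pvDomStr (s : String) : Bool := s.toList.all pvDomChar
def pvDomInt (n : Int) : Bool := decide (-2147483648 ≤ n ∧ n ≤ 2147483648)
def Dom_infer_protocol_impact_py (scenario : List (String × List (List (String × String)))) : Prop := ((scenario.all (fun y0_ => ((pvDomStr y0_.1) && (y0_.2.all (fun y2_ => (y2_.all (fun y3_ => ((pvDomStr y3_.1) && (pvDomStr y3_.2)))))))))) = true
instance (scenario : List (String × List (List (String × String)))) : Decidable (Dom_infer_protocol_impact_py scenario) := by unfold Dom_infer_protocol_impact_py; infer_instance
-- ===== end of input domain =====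

-- B replaces A's set collection + six ordered set-intersection branches by a min-reduction:
-- each target maps to a numeric severity rank, the loop keeps the minimum rank, and the
-- answer is read off a name table indexed by that minimum (objective: alternative).

-- ===== PORT A =====
def infer_protocol_impact_py (scenario : List (String × List (List (String × String)))) : String :=
  let targets : PySem.Set String :=
    ((PySem.Dict.mk scenario).getD "faults" []).foldl
      (fun s f => PySem.Set.add s ((PySem.Dict.mk f).getD "target" "")) PySem.Set.empty
  if PySem.Set.inter targets (PySem.Set.ofList ["rtpengine"]) ≠ [] then "RTP"
  else if PySem.Set.inter targets (PySem.Set.ofList ["pcscf", "icscf", "scscf"]) ≠ [] then "SIP"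
  else if PySem.Set.inter targets (PySem.Set.ofList ["pyhss"]) ≠ [] then "Diameter"
  else if PySem.Set.inter targets (PySem.Set.ofList ["upf", "nr_gnb"]) ≠ [] then "GTP-U"
  else if PySem.Set.inter targets (PySem.Set.ofList ["amf"]) ≠ [] then "NGAP"
  else if PySem.Set.inter targets (PySem.Set.ofList ["smf"]) ≠ [] then "PFCP"
  else "multiple"

-- ===== PORT B =====
def rankDict : PySem.Dict String Int :=
  PySem.Dict.mk [("rtpengine", 0), ("pcscf", 1), ("icscf", 1), ("scscf", 1),
                 ("pyhss", 2), ("upf", 3), ("nr_gnb", 3), ("amf", 4), ("smf", 5)]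

def namesList : List String := ["RTP", "SIP", "Diameter", "GTP-U", "NGAP", "PFCP", "multiple"]

def infer_protocol_impact_py_alt (scenario : List (String × List (List (String × String)))) : String :=
  let best : Int :=
    ((PySem.Dict.mk scenario).getD "faults" []).foldl
      (fun b f => min b (rankDict.getD ((PySem.Dict.mk f).getD "target" "") 6)) 6
  -- _NAMES[best]: best always lies in 0..6, so the IndexError arm is unreachable
  match PySem.List.pyGet? namesList best with
  | some s => s
  | none => ""

-- ===== PRECONDITION & SPEC =====
def Spec_infer_protocol_impact_py (scenario : List (String × List (List (String × String)))) (out : String) : Prop := out = infer_protocol_impact_py_alt scenario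
instance (scenario : List (String × List (List (String × String)))) (out : String) : Decidable (Spec_infer_protocol_impact_py scenario out) := by unfold Spec_infer_protocol_impact_py; infer_instance

-- ===== CLAIM (what is proved, stated in full; the proofs are below) =====
def Claim_equal_infer_protocol_impact_py : Prop := ∀ (scenario : List (String × List (List (String × String)))), Dom_infer_protocol_impact_py scenario → Spec_infer_protocol_impact_py scenario (infer_protocol_impact_py scenario)

-- ===== LEMMAS AND PROOFS =====

-- abbreviations used only by the proofs
def tgt (f : List (String × String)) : String := (PySem.Dict.mk f).getD "target" ""
def rk (f : List (String × String)) : Int := rankDict.getD (tgt f) 6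

lemma ne_nil_iff_exists_mem {α : Type} (l : List α) : l ≠ [] ↔ ∃ x, x ∈ l := by
  cases l <;> simp

-- A's branch condition, characterised
lemma condA_iff (faults : List (List (String × String))) (S : List String) :
    (PySem.Set.inter
      (faults.foldl (fun s f => PySem.Set.add s ((PySem.Dict.mk f).getD "target" "")) PySem.Set.empty)
      (PySem.Set.ofList S) ≠ []) ↔ ∃ f ∈ faults, tgt f ∈ S := by
  rw [ne_nil_iff_exists_mem]
  constructor
  · rintro ⟨x, hx⟩
    rw [PySem.Set.mem_inter] at hx
    obtain ⟨hx1, hx2⟩ := hx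
    rw [PySem.Set.mem_foldl_add] at hx1
    rcases hx1 with h | ⟨f, hf, rfl⟩
    · simp [PySem.Set.empty] at h
    · exact ⟨f, hf, (PySem.Set.mem_ofList S _).1 hx2⟩
  · rintro ⟨f, hf, hS⟩
    exact ⟨tgt f, (PySem.Set.mem_inter _ _ _).2 ⟨(PySem.Set.mem_foldl_add _ _ _ _).2 (Or.inr ⟨f, hf, rfl⟩),
      (PySem.Set.mem_ofList S _).2 hS⟩⟩

-- the rank table, characterised value by value
lemma pvRankMem (t : String) :
    rankDict.getD t 6 = 0 ∨ rankDict.getD t 6 = 1 ∨ rankDict.getD t 6 = 2 ∨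
    rankDict.getD t 6 = 3 ∨ rankDict.getD t 6 = 4 ∨ rankDict.getD t 6 = 5 ∨
    rankDict.getD t 6 = 6 := by
  unfold rankDict
  simp only [PySem.Dict.getD_eq_get?_getD, PySem.Dict.get?_mk_cons, beq_iff_eq]
  split_ifs <;> simp [PySem.Dict.get?]

lemma pvRank0 (t : String) : rankDict.getD t 6 = 0 ↔ t ∈ ["rtpengine"] := by
  unfold rankDict
  simp only [PySem.Dict.getD_eq_get?_getD, PySem.Dict.get?_mk_cons, beq_iff_eq]
  split_ifs <;> simp_all [PySem.Dict.get?, eq_comm]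
lemma pvRank1 (t : String) : rankDict.getD t 6 = 1 ↔ t ∈ ["pcscf", "icscf", "scscf"] := by
  unfold rankDict
  simp only [PySem.Dict.getD_eq_get?_getD, PySem.Dict.get?_mk_cons, beq_iff_eq]
  split_ifs <;> simp_all [PySem.Dict.get?, eq_comm]
lemma pvRank2 (t : String) : rankDict.getD t 6 = 2 ↔ t ∈ ["pyhss"] := by
  unfold rankDict
  simp only [PySem.Dict.getD_eq_get?_getD, PySem.Dict.get?_mk_cons, beq_iff_eq]
  split_ifs <;> simp_all [PySem.Dict.get?, eq_comm]
lemma pvRank3 (t : String) : rankDict.getD t 6 = 3 ↔ t ∈ ["upf", "nr_gnb"] := by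
  unfold rankDict
  simp only [PySem.Dict.getD_eq_get?_getD, PySem.Dict.get?_mk_cons, beq_iff_eq]
  split_ifs <;> simp_all [PySem.Dict.get?, eq_comm]
lemma pvRank4 (t : String) : rankDict.getD t 6 = 4 ↔ t ∈ ["amf"] := by
  unfold rankDict
  simp only [PySem.Dict.getD_eq_get?_getD, PySem.Dict.get?_mk_cons, beq_iff_eq]
  split_ifs <;> simp_all [PySem.Dict.get?, eq_comm]
lemma pvRank5 (t : String) : rankDict.getD t 6 = 5 ↔ t ∈ ["smf"] := by
  unfold rankDict
  simp only [PySem.Dict.getD_eq_get?_getD, PySem.Dict.get?_mk_cons, beq_iff_eq]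
  split_ifs <;> simp_all [PySem.Dict.get?, eq_comm]

-- min-fold facts
lemma foldl_min_le_init {α : Type} (g : α → Int) (l : List α) (b : Int) :
    l.foldl (fun b x => min b (g x)) b ≤ b := by
  induction l generalizing b with
  | nil => simp
  | cons x xs ih => exact le_trans (ih _) (min_le_left _ _)

lemma foldl_min_cases {α : Type} (g : α → Int) (l : List α) (b : Int) :
    l.foldl (fun b x => min b (g x)) b = b ∨ ∃ x ∈ l, l.foldl (fun b x => min b (g x)) b = g x := by
  induction l generalizing b with
  | nil => simp
  | cons x xs ih =>
    simp only [List.foldl_cons]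
    rcases ih (min b (g x)) with h | ⟨y, hy, h⟩
    · rcases min_cases b (g x) with ⟨he, _⟩ | ⟨he, _⟩
      · exact Or.inl (h.trans he)
      · exact Or.inr ⟨x, List.mem_cons_self, h.trans he⟩
    · exact Or.inr ⟨y, List.mem_cons_of_mem _ hy, h⟩

lemma foldl_min_le_mem {α : Type} (g : α → Int) (x : α) :
    ∀ (l : List α) (b : Int), x ∈ l → l.foldl (fun b x => min b (g x)) b ≤ g x := by
  intro l
  induction l with
  | nil => intro b hx; cases hx
  | cons y ys ih =>
    intro b hx
    simp only [List.foldl_cons]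
    rcases List.mem_cons.1 hx with rfl | h
    · exact le_trans (foldl_min_le_init _ _ _) (min_le_right _ _)
    · exact ih _ h

lemma foldl_min_eq {α : Type} (g : α → Int) (l : List α) (i : Int)
    (hle6 : i ≤ 6) (hmem : ∃ x ∈ l, g x = i) (hlt : ∀ x ∈ l, ¬ g x < i) :
    l.foldl (fun b x => min b (g x)) 6 = i := by
  obtain ⟨x, hx, hgx⟩ := hmem
  have h1 : l.foldl (fun b x => min b (g x)) 6 ≤ i := by
    rw [← hgx]; exact foldl_min_le_mem g x l 6 hx
  rcases foldl_min_cases g l 6 with h | ⟨y, hy, h⟩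
  · omega
  · have := hlt y hy
    omega

-- the final fold, when no target is ranked below 6
lemma foldl_min_all_six {α : Type} (g : α → Int) (l : List α)
    (h : ∀ x ∈ l, g x = 6) : l.foldl (fun b x => min b (g x)) 6 = 6 := by
  rcases foldl_min_cases g l 6 with h6 | ⟨y, hy, he⟩
  · exact h6
  · rw [he, h y hy]

-- ===== VERDICT (by name: the statement is the Claim_ definition above) =====
theorem infer_protocol_impact_py_spec : Claim_equal_infer_protocol_impact_py := by
  intro scenario _
  unfold Spec_infer_protocol_impact_py infer_protocol_impact_py infer_protocol_impact_py_alt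
  set faults := ((PySem.Dict.mk scenario).getD "faults" ([] : List (List (String × String)))) with hfdef
  simp only [condA_iff]
  have hfold : faults.foldl
      (fun b f => min b (rankDict.getD ((PySem.Dict.mk f).getD "target" "") 6)) 6
      = faults.foldl (fun b f => min b (rk f)) 6 := rfl
  rw [hfold]
  split_ifs with h0 h1 h2 h3 h4 h5
  · -- RTP, rank 0
    have hm : faults.foldl (fun b f => min b (rk f)) 6 = 0 := by
      apply foldl_min_eq _ _ _ (by norm_num)
      · obtain ⟨f, hf, ht⟩ := h0
        exact ⟨f, hf, (pvRank0 _).2 ht⟩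
      · intro x hx hlt
        rcases pvRankMem (tgt x) with h | h | h | h | h | h | h <;> simp only [rk] at hlt <;> omega
    rw [hm]; rfl
  · -- SIP, rank 1
    have hm : faults.foldl (fun b f => min b (rk f)) 6 = 1 := by
      apply foldl_min_eq _ _ _ (by norm_num)
      · obtain ⟨f, hf, ht⟩ := h1
        exact ⟨f, hf, (pvRank1 _).2 ht⟩
      · intro x hx hlt
        rcases pvRankMem (tgt x) with h | h | h | h | h | h | h <;> simp only [rk] at hlt
        · exact h0 ⟨x, hx, (pvRank0 _).1 h⟩
        all_goals omega
    rw [hm]; rfl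
  · -- Diameter, rank 2
    have hm : faults.foldl (fun b f => min b (rk f)) 6 = 2 := by
      apply foldl_min_eq _ _ _ (by norm_num)
      · obtain ⟨f, hf, ht⟩ := h2
        exact ⟨f, hf, (pvRank2 _).2 ht⟩
      · intro x hx hlt
        rcases pvRankMem (tgt x) with h | h | h | h | h | h | h <;> simp only [rk] at hlt
        · exact h0 ⟨x, hx, (pvRank0 _).1 h⟩
        · exact h1 ⟨x, hx, (pvRank1 _).1 h⟩
        all_goals omega
    rw [hm]; rfl
  · -- GTP-U, rank 3
    have hm : faults.foldl (fun b f => min b (rk f)) 6 = 3 := by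
      apply foldl_min_eq _ _ _ (by norm_num)
      · obtain ⟨f, hf, ht⟩ := h3
        exact ⟨f, hf, (pvRank3 _).2 ht⟩
      · intro x hx hlt
        rcases pvRankMem (tgt x) with h | h | h | h | h | h | h <;> simp only [rk] at hlt
        · exact h0 ⟨x, hx, (pvRank0 _).1 h⟩
        · exact h1 ⟨x, hx, (pvRank1 _).1 h⟩
        · exact h2 ⟨x, hx, (pvRank2 _).1 h⟩
        all_goals omega
    rw [hm]; rfl
  · -- NGAP, rank 4
    have hm : faults.foldl (fun b f => min b (rk f)) 6 = 4 := by
      apply foldl_min_eq _ _ _ (by norm_num)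
      · obtain ⟨f, hf, ht⟩ := h4
        exact ⟨f, hf, (pvRank4 _).2 ht⟩
      · intro x hx hlt
        rcases pvRankMem (tgt x) with h | h | h | h | h | h | h <;> simp only [rk] at hlt
        · exact h0 ⟨x, hx, (pvRank0 _).1 h⟩
        · exact h1 ⟨x, hx, (pvRank1 _).1 h⟩
        · exact h2 ⟨x, hx, (pvRank2 _).1 h⟩
        · exact h3 ⟨x, hx, (pvRank3 _).1 h⟩
        all_goals omega
    rw [hm]; rfl
  · -- PFCP, rank 5
    have hm : faults.foldl (fun b f => min b (rk f)) 6 = 5 := by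
      apply foldl_min_eq _ _ _ (by norm_num)
      · obtain ⟨f, hf, ht⟩ := h5
        exact ⟨f, hf, (pvRank5 _).2 ht⟩
      · intro x hx hlt
        rcases pvRankMem (tgt x) with h | h | h | h | h | h | h <;> simp only [rk] at hlt
        · exact h0 ⟨x, hx, (pvRank0 _).1 h⟩
        · exact h1 ⟨x, hx, (pvRank1 _).1 h⟩
        · exact h2 ⟨x, hx, (pvRank2 _).1 h⟩
        · exact h3 ⟨x, hx, (pvRank3 _).1 h⟩
        · exact h4 ⟨x, hx, (pvRank4 _).1 h⟩
        all_goals omega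
    rw [hm]; rfl
  · -- multiple, rank 6
    have hm : faults.foldl (fun b f => min b (rk f)) 6 = 6 := by
      apply foldl_min_all_six
      intro x hx
      rcases pvRankMem (tgt x) with h | h | h | h | h | h | h
      · exact absurd ⟨x, hx, (pvRank0 _).1 h⟩ h0
      · exact absurd ⟨x, hx, (pvRank1 _).1 h⟩ h1
      · exact absurd ⟨x, hx, (pvRank2 _).1 h⟩ h2
      · exact absurd ⟨x, hx, (pvRank3 _).1 h⟩ h3
      · exact absurd ⟨x, hx, (pvRank4 _).1 h⟩ h4
      · exact absurd ⟨x, hx, (pvRank5 _).1 h⟩ h5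
      · exact h
    rw [hm]; rfl
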